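-- pv_equiv track=rewrite | github.com/mozilla-it/fx-sentiment-analysis | src/support/support_functions.py | find_word_pair_in_text
-- ===== SOURCE A (Python) =====
-- def find_word_pair_in_text(text, word1, word2, distance=2):
--     """
--     The function check if two words are present in the given text within the given distance
--     outputs:
--     - found: boolean, if the two words are found
--     indices as the word pair may present for more than once
--     """
--     found = False
--     for i in range(len(text)):
--         if text[i] == word1:  # Find the first word
--             for j in range(max(i - distance, 0), min(i + distance, len(text))):
--                 if text[j] == word2:  # Find the second word in the neighbours
--                     found = True
--                     return found
--     return found
-- ===== SOURCE B (Python) =====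
-- def find_word_pair_in_text(text, word1, word2, distance=2):
--     # Collect the occurrence indices of word2 once (they are increasing),
--     # then sweep occurrences of word1 left to right, advancing a single
--     # monotone pointer into that index list: word1 at i matches iff the
--     # first word2-occurrence >= i - distance lies within the symmetric
--     # window [i - distance, i + distance].
--     idx2 = [j for j, w in enumerate(text) if w == word2]
--     p = 0
--     for i, w in enumerate(text):
--         if w == word1:
--             while p < len(idx2) and idx2[p] < i - distance:
--                 p += 1
--             if p < len(idx2) and idx2[p] <= i + distance:
--                 return True
--     return False
-- ===== Notes on version B (the rewrite author's own statement) =====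
-- stated objective: alternative
-- what changed: Replaces A's per-occurrence rescan of the neighbourhood with a precomputed increasing list of word2 occurrence indices swept by a single monotone pointer (two-pointer merge), using the symmetric window [i-distance, i+distance]; it trades A's inner window scans for one auxiliary occurrence list and avoids rescanning when distance is large.
-- intended difference: On inputs where the only word2 occurrence within distance of a word1 occurrence at i sits exactly at i+distance, A returns False (its inner range excludes index i+distance) while B returns True; the docstring says 'within the given distance', which is the symmetric window, so B's value is the intended one. — e.g. on find_word_pair_in_text(["a", "b"], "a", "b", 1): A returns false, B returns true
import Mathlib
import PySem

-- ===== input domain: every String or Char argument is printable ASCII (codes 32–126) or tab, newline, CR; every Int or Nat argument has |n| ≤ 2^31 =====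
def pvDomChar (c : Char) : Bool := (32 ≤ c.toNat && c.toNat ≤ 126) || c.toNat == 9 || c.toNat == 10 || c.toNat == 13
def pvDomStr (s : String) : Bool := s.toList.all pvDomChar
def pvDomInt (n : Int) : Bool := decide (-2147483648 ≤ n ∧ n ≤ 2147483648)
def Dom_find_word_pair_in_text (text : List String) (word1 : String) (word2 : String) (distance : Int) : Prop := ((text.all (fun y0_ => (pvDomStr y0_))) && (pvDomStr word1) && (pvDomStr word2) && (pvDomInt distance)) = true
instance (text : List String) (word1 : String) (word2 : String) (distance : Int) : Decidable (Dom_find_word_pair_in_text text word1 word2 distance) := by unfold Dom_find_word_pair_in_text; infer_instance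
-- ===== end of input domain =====

-- B replaces A's per-occurrence neighbourhood rescan with a precomputed occurrence-index
-- list of word2 swept by a monotone pointer (two-pointer merge), using the symmetric
-- window; A = B except where only an exact-right-distance pair exists (the D_ region).

-- ===== PORT A =====
def find_word_pair_in_text (text : List String) (word1 : String) (word2 : String) (distance : Int) : Bool :=
  -- for i in range(len(text)): if text[i] == word1: for j in range(max(i-distance,0), min(i+distance, len(text))): if text[j] == word2: return True
  (PySem.List.pyRange 0 (text.length : Int) 1).any (fun i =>
    if PySem.List.pyGetD text i "" == word1 then
      (PySem.List.pyRange (max (i - distance) 0) (min (i + distance) (text.length : Int)) 1).any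
        (fun j => PySem.List.pyGetD text j "" == word2)
    else false)

-- ===== PORT B =====
-- the `while p < len(idx2) and idx2[p] < lo: p += 1` pointer advance (suffix view of idx2)
def pvSkipLt (lo : Int) : List Int → List Int
  | [] => []
  | j :: rest => if j < lo then pvSkipLt lo rest else j :: rest

-- the `for i, w in enumerate(text)` loop carrying the pointer suffix
def pvAltLoop (word1 : String) (distance : Int) : List (Int × String) → List Int → Bool
  | [], _ => false
  | (i, w) :: rest, idx2 =>
    if w == word1 then
      match pvSkipLt (i - distance) idx2 with
      | [] => pvAltLoop word1 distance rest []
      | j :: t => if j ≤ i + distance then true else pvAltLoop word1 distance rest (j :: t)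
    else pvAltLoop word1 distance rest idx2

def find_word_pair_in_text_alt (text : List String) (word1 : String) (word2 : String) (distance : Int) : Bool :=
  let idx2 := ((PySem.List.enumerate text 0).filter (fun p => p.2 == word2)).map (fun p => p.1)
  pvAltLoop word1 distance (PySem.List.enumerate text 0) idx2

-- ===== PRECONDITION & SPEC =====
-- spec-level helper (no port code): is there a word1/word2 occurrence pair (i, j) with lo ≤ j - i ≤ hi?
def pvHasPair (text : List String) (w1 w2 : String) (lo hi : Int) : Bool :=
  (List.range text.length).any (fun i => (List.range text.length).any (fun j =>
    text.getD i "" == w1 && text.getD j "" == w2 &&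
      decide (lo + (i : Int) ≤ (j : Int)) && decide ((j : Int) ≤ hi + (i : Int))))

-- On inputs where the only word2 occurrence within `distance` of a word1 occurrence at i sits exactly
-- at i+distance, A returns false (its inner range excludes index i+distance) while B returns true;
-- 'within the given distance' is the symmetric window, so B's value is the intended one.
def D_find_word_pair_in_text (text : List String) (word1 : String) (word2 : String) (distance : Int) : Prop :=
  0 ≤ distance ∧ pvHasPair text word1 word2 distance distance = true ∧
    pvHasPair text word1 word2 (-distance) (distance - 1) = false
instance (text : List String) (word1 : String) (word2 : String) (distance : Int) : Decidable (D_find_word_pair_in_text text word1 word2 distance) := by unfold D_find_word_pair_in_text; infer_instance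

def Spec_find_word_pair_in_text (text : List String) (word1 : String) (word2 : String) (distance : Int) (out : Bool) : Prop := ¬ D_find_word_pair_in_text text word1 word2 distance → out = find_word_pair_in_text_alt text word1 word2 distance
instance (text : List String) (word1 : String) (word2 : String) (distance : Int) (out : Bool) : Decidable (Spec_find_word_pair_in_text text word1 word2 distance out) := by unfold Spec_find_word_pair_in_text; infer_instance

def pvDiffWitness_find_word_pair_in_text : List String × String × String × Int := (["a", "b"], "a", "b", 1)
def pvDiffWitnessOut_find_word_pair_in_text : Bool × Bool := (false, true)

-- ===== CLAIM (what is proved, stated in full; the proofs are below) =====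
def Claim_unchanged_find_word_pair_in_text : Prop := ∀ (text : List String) (word1 : String) (word2 : String) (distance : Int), Dom_find_word_pair_in_text text word1 word2 distance → Spec_find_word_pair_in_text text word1 word2 distance (find_word_pair_in_text text word1 word2 distance)
def Claim_changed_find_word_pair_in_text : Prop := Dom_find_word_pair_in_text (pvDiffWitness_find_word_pair_in_text.1) (pvDiffWitness_find_word_pair_in_text.2.1) (pvDiffWitness_find_word_pair_in_text.2.2.1) (pvDiffWitness_find_word_pair_in_text.2.2.2) ∧ D_find_word_pair_in_text (pvDiffWitness_find_word_pair_in_text.1) (pvDiffWitness_find_word_pair_in_text.2.1) (pvDiffWitness_find_word_pair_in_text.2.2.1) (pvDiffWitness_find_word_pair_in_text.2.2.2) ∧ find_word_pair_in_text (pvDiffWitness_find_word_pair_in_text.1) (pvDiffWitness_find_word_pair_in_text.2.1) (pvDiffWitness_find_word_pair_in_text.2.2.1) (pvDiffWitness_find_word_pair_in_text.2.2.2) = pvDiffWitnessOut_find_word_pair_in_text.1 ∧ find_word_pair_in_text_alt (pvDiffWitness_find_word_pair_in_text.1) (pvDiffWitness_find_word_pair_in_text.2.1) (pvDiffWitness_find_word_pair_in_text.2.2.1)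 (pvDiffWitness_find_word_pair_in_text.2.2.2) = pvDiffWitnessOut_find_word_pair_in_text.2 ∧ pvDiffWitnessOut_find_word_pair_in_text.1 ≠ pvDiffWitnessOut_find_word_pair_in_text.2
def Claim_exact_find_word_pair_in_text : Prop := ∀ (text : List String) (word1 : String) (word2 : String) (distance : Int), Dom_find_word_pair_in_text text word1 word2 distance → D_find_word_pair_in_text text word1 word2 distance → find_word_pair_in_text text word1 word2 distance ≠ find_word_pair_in_text_alt text word1 word2 distance

-- ===== LEMMAS AND PROOFS =====

-- canonical Prop form of pvHasPair
def pvPairProp (text : List String) (w1 w2 : String) (lo hi : Int) : Prop :=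
  ∃ i j : Nat, i < text.length ∧ j < text.length ∧ text.getD i "" = w1 ∧ text.getD j "" = w2 ∧
    lo + (i : Int) ≤ (j : Int) ∧ (j : Int) ≤ hi + (i : Int)

lemma pvHasPair_iff (text : List String) (w1 w2 : String) (lo hi : Int) :
    pvHasPair text w1 w2 lo hi = true ↔ pvPairProp text w1 w2 lo hi := by
  simp [pvHasPair, pvPairProp, List.any_eq_true, List.mem_range]
  constructor
  · rintro ⟨i, h1, j, h2, ⟨⟨a, b⟩, c⟩, d⟩; exact ⟨i, h1, j, h2, a, b, c, d⟩
  · rintro ⟨i, h1, j, h2, a, b, c, d⟩; exact ⟨i, h1, j, h2, ⟨⟨a, b⟩, c⟩, d⟩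

lemma pvSkipLt_split (lo : Int) (l : List Int) :
    ∃ pre, l = pre ++ pvSkipLt lo l ∧ ∀ x ∈ pre, x < lo := by
  induction l with
  | nil => exact ⟨[], by simp [pvSkipLt]⟩
  | cons j rest ih =>
    by_cases h : j < lo
    · obtain ⟨pre, h1, h2⟩ := ih
      exact ⟨j :: pre, by simp [pvSkipLt, h, ← h1], by
        intro x hx; rcases List.mem_cons.mp hx with rfl | hx
        · exact h
        · exact h2 x hx⟩
    · exact ⟨[], by simp [pvSkipLt, h]⟩

lemma pvSkipLt_head (lo : Int) (l : List Int) (j : Int) (t : List Int)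
    (h : pvSkipLt lo l = j :: t) : lo ≤ j := by
  induction l with
  | nil => simp [pvSkipLt] at h
  | cons a rest ih =>
    by_cases ha : a < lo
    · rw [pvSkipLt, if_pos ha] at h; exact ih h
    · rw [pvSkipLt, if_neg ha] at h
      rw [List.cons.injEq] at h
      omega

lemma pvAltLoop_eq (w1 : String) (d : Int) :
    ∀ (ents : List (Int × String)) (idx2 : List Int),
    List.Pairwise (fun (p q : Int × String) => p.1 ≤ q.1) ents →
    List.Pairwise (· ≤ ·) idx2 →
    pvAltLoop w1 d ents idx2 =
      ents.any (fun p => p.2 == w1 && idx2.any (fun j => decide (p.1 - d ≤ j) && decide (j ≤ p.1 + d))) := by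
  intro ents
  induction ents with
  | nil => intro idx2 _ _; simp [pvAltLoop]
  | cons piw rest ih =>
    obtain ⟨i, w⟩ := piw
    intro idx2 hents hidx
    have hrest : List.Pairwise (fun (p q : Int × String) => p.1 ≤ q.1) rest := hents.of_cons
    have hle : ∀ q ∈ rest, i ≤ q.1 := fun q hq => List.rel_of_pairwise_cons hents hq
    by_cases hw : w == w1
    · obtain ⟨pre, hsplit, hpre⟩ := pvSkipLt_split (i - d) idx2
      have hidx' : List.Pairwise (fun a b : Int => a ≤ b) (pvSkipLt (i - d) idx2) := by
        rw [hsplit] at hidx; exact (List.pairwise_append.mp hidx).2.1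
      have hdrop : ∀ (i' : Int), i ≤ i' →
          (idx2.any (fun j => decide (i' - d ≤ j) && decide (j ≤ i' + d))) =
          ((pvSkipLt (i - d) idx2).any (fun j => decide (i' - d ≤ j) && decide (j ≤ i' + d))) := by
        intro i' hi'
        conv_lhs => rw [hsplit]
        rw [List.any_append]
        have hfalse : pre.any (fun j => decide (i' - d ≤ j) && decide (j ≤ i' + d)) = false := by
          simp only [List.any_eq_false]
          intro x hx
          have := hpre x hx
          simp only [Bool.and_eq_true, decide_eq_true_eq, not_and]
          omega
        rw [hfalse, Bool.false_or]
      have hrest_any : ∀ idx : List Int, idx = pvSkipLt (i - d) idx2 →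
          rest.any (fun p => p.2 == w1 && idx.any (fun j => decide (p.1 - d ≤ j) && decide (j ≤ p.1 + d))) =
          rest.any (fun p => p.2 == w1 && idx2.any (fun j => decide (p.1 - d ≤ j) && decide (j ≤ p.1 + d))) := by
        intro idx hidx_eq
        apply PySem.List.any_congr_mem
        intro p hp
        rw [hidx_eq, hdrop p.1 (hle p hp)]
      rcases hE : pvSkipLt (i - d) idx2 with _ | ⟨j, t⟩
      · -- pointer ran off the end: no word2 occurrence ≥ i - d remains
        simp only [pvAltLoop, hw, hE, if_true, List.any_cons, Bool.true_and]
        rw [ih [] hrest List.Pairwise.nil]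
        rw [hrest_any [] hE.symm]
        rw [hdrop i le_rfl, hE]
        simp
      · have hjlo : i - d ≤ j := pvSkipLt_head _ _ _ _ hE
        have hjmem : j ∈ idx2 := by rw [hsplit, hE]; simp
        have hsorted : ∀ x ∈ t, j ≤ x := by
          rw [hE] at hidx'; exact fun x hx => List.rel_of_pairwise_cons hidx' hx
        simp only [pvAltLoop, hw, hE, if_true, List.any_cons, Bool.true_and]
        by_cases hcl : j ≤ i + d
        · rw [if_pos hcl]
          have : idx2.any (fun x => decide (i - d ≤ x) && decide (x ≤ i + d)) = true := by
            rw [List.any_eq_true]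
            exact ⟨j, hjmem, by simp; omega⟩
          rw [this]; simp
        · rw [if_neg hcl]
          rw [ih (j :: t) hrest (hE ▸ hidx')]
          rw [hrest_any (j :: t) hE.symm]
          have hwin : idx2.any (fun x => decide (i - d ≤ x) && decide (x ≤ i + d)) = false := by
            rw [hdrop i le_rfl, hE]
            simp only [List.any_eq_false]
            intro x hx
            rcases List.mem_cons.mp hx with rfl | hx
            · simp; omega
            · have := hsorted x hx; simp; omega
          rw [hwin, Bool.false_or]
    · rw [pvAltLoop, if_neg (by simpa using hw)]
      rw [ih idx2 hrest hidx]
      simp only [List.any_cons]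
      rw [show (w == w1) = false by simpa using hw]
      simp

lemma pvA_iff (text : List String) (w1 w2 : String) (d : Int) :
    find_word_pair_in_text text w1 w2 d = true ↔ pvPairProp text w1 w2 (-d) (d - 1) := by
  simp only [find_word_pair_in_text, List.any_eq_true, PySem.List.mem_pyRange_one, beq_iff_eq,
    Bool.if_false_right, Bool.and_eq_true, decide_eq_true_eq]
  constructor
  · rintro ⟨i, ⟨hi0, hin⟩, hw1, j, ⟨hj1, hj2⟩, hw2⟩
    rw [max_le_iff] at hj1
    rw [lt_min_iff] at hj2
    obtain ⟨a, rfl⟩ : ∃ n : ℕ, i = (n : Int) := ⟨i.toNat, by omega⟩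
    obtain ⟨b, rfl⟩ : ∃ n : ℕ, j = (n : Int) := ⟨j.toNat, by omega⟩
    rw [PySem.List.pyGetD_natCast] at hw1 hw2
    exact ⟨a, b, by exact_mod_cast hin, by exact_mod_cast hj2.2, hw1, hw2, by omega, by omega⟩
  · rintro ⟨i, j, h1, h2, h3, h4, h5, h6⟩
    have h1' : (i : Int) < (text.length : Int) := by exact_mod_cast h1
    have h2' : (j : Int) < (text.length : Int) := by exact_mod_cast h2
    refine ⟨(i : Int), ⟨by omega, h1'⟩, ?_, (j : Int), ⟨?_, ?_⟩, ?_⟩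
    · rw [PySem.List.pyGetD_natCast]; exact h3
    · rw [max_le_iff]; omega
    · rw [lt_min_iff]; omega
    · rw [PySem.List.pyGetD_natCast]; exact h4

lemma pvB_iff (text : List String) (w1 w2 : String) (d : Int) :
    find_word_pair_in_text_alt text w1 w2 d = true ↔ pvPairProp text w1 w2 (-d) d := by
  have hents : List.Pairwise (fun (p q : Int × String) => p.1 ≤ q.1) (PySem.List.enumerate text 0) :=
    (PySem.List.pairwise_lt_enumerate text 0).imp le_of_lt
  have hfilter : List.Pairwise (fun (p q : Int × String) => p.1 ≤ q.1)
      ((PySem.List.enumerate text 0).filter (fun p => p.2 == w2)) :=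
    ((PySem.List.pairwise_lt_enumerate text 0).filter _).imp le_of_lt
  have hidx : List.Pairwise (· ≤ ·)
      (((PySem.List.enumerate text 0).filter (fun p => p.2 == w2)).map (fun p => p.1)) :=
    List.pairwise_map.mpr hfilter
  unfold find_word_pair_in_text_alt
  rw [pvAltLoop_eq w1 d _ _ hents hidx]
  simp only [List.any_eq_true, PySem.List.mem_enumerate_iff, List.mem_map, List.mem_filter,
    Bool.and_eq_true, decide_eq_true_eq, beq_iff_eq]
  constructor
  · rintro ⟨p, ⟨k, hk, rfl⟩, hw1, j, ⟨q, ⟨⟨m, hm, rfl⟩, hq2⟩, rfl⟩, hwin1, hwin2⟩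
    refine ⟨k, m, hk, hm, ?_, ?_, by push_cast at hwin1 ⊢; omega, by push_cast at hwin2 ⊢; omega⟩
    · rw [List.getD_eq_getElem _ _ hk]; simpa using hw1
    · rw [List.getD_eq_getElem _ _ hm]; simpa using hq2
  · rintro ⟨i, j, h1, h2, h3, h4, h5, h6⟩
    refine ⟨(0 + (i : Int), text[i]), ⟨i, h1, rfl⟩, ?_, (0 + (j : Int)),
      ⟨⟨(0 + (j : Int), text[j]), ⟨⟨j, h2, rfl⟩, ?_⟩, rfl⟩, ?_, ?_⟩⟩
    · rw [List.getD_eq_getElem _ _ h1] at h3; simpa using h3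
    · rw [List.getD_eq_getElem _ _ h2] at h4; simpa using h4
    · push_cast at h5 ⊢; omega
    · push_cast at h6 ⊢; omega

lemma pvPair_split (text : List String) (w1 w2 : String) (d : Int) (hd : 0 ≤ d) :
    pvPairProp text w1 w2 (-d) d ↔ pvPairProp text w1 w2 (-d) (d - 1) ∨ pvPairProp text w1 w2 d d := by
  constructor
  · rintro ⟨i, j, h1, h2, h3, h4, h5, h6⟩
    by_cases hj : (j : Int) ≤ d - 1 + (i : Int)
    · exact Or.inl ⟨i, j, h1, h2, h3, h4, h5, hj⟩
    · exact Or.inr ⟨i, j, h1, h2, h3, h4, by omega, by omega⟩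
  · rintro (⟨i, j, h1, h2, h3, h4, h5, h6⟩ | ⟨i, j, h1, h2, h3, h4, h5, h6⟩)
    · exact ⟨i, j, h1, h2, h3, h4, h5, by omega⟩
    · exact ⟨i, j, h1, h2, h3, h4, by omega, by omega⟩

lemma pvPair_neg (text : List String) (w1 w2 : String) (lo hi : Int) (h : hi < lo) :
    ¬ pvPairProp text w1 w2 lo hi := by
  rintro ⟨i, j, _, _, _, _, h5, h6⟩; omega

-- ===== VERDICT (by name: the statement is the Claim_ definition above) =====
theorem find_word_pair_in_text_spec : Claim_unchanged_find_word_pair_in_text := by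
  intro text w1 w2 d _ hnD
  rw [Bool.eq_iff_iff, pvA_iff, pvB_iff]
  by_cases hd : 0 ≤ d
  · rw [pvPair_split text w1 w2 d hd]
    by_cases hdd : pvHasPair text w1 w2 d d = true
    · by_cases hsm : pvHasPair text w1 w2 (-d) (d - 1) = true
      · have hp := (pvHasPair_iff text w1 w2 (-d) (d - 1)).mp hsm
        tauto
      · exact absurd ⟨hd, hdd, Bool.eq_false_iff.mpr hsm⟩ hnD
    · have hp : ¬ pvPairProp text w1 w2 d d :=
        fun hp => hdd ((pvHasPair_iff text w1 w2 d d).mpr hp)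
      tauto
  · have h1 := pvPair_neg text w1 w2 (-d) (d - 1) (by omega)
    have h2 := pvPair_neg text w1 w2 (-d) d (by omega)
    tauto

theorem find_word_pair_in_text_changed : Claim_changed_find_word_pair_in_text := by
  unfold Claim_changed_find_word_pair_in_text; decide

theorem find_word_pair_in_text_tight : Claim_exact_find_word_pair_in_text := by
  intro text w1 w2 d _ hD
  rcases hD with ⟨hd, hdd, hsm⟩
  have hB : find_word_pair_in_text_alt text w1 w2 d = true := by
    rw [pvB_iff, pvPair_split text w1 w2 d hd]
    exact Or.inr ((pvHasPair_iff text w1 w2 d d).mp hdd)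
  have hA : find_word_pair_in_text text w1 w2 d = false := by
    rw [Bool.eq_false_iff, Ne, pvA_iff, ← pvHasPair_iff, hsm]
    simp
  rw [hA, hB]; simp
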